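-- pv_equiv track=rewrite | github.com/heitor57/poi-rss | algorithms/cat_utils.py | get_most_detailed_categories
-- ===== SOURCE A (Python) =====
-- def get_most_detailed_categories(categories,dict_alias_title,dict_alias_depth):
--     max_height=0
--     for category in categories:
--         max_height = max(dict_alias_depth[dict_alias_title[category]],max_height)
--     new_categories=list()
--     for category in categories:
--         height=dict_alias_depth[dict_alias_title[category]]
--         if(height == max_height):
--             new_categories.append(category)
--     return new_categories
-- ===== SOURCE B (Python) =====
-- def get_most_detailed_categories(categories, dict_alias_title, dict_alias_depth):
--     max_height = 0
--     new_categories = []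
--     for category in categories:
--         height = dict_alias_depth[dict_alias_title[category]]
--         if height > max_height:
--             max_height = height
--             new_categories = [category]
--         elif height == max_height:
--             new_categories.append(category)
--     return new_categories
-- ===== Notes on version B (the rewrite author's own statement) =====
-- stated objective: alternative
-- what changed: Collapses A's two sequential passes (max pass, then filter pass) into a single pass that resets the result list whenever a strictly larger depth appears, doing one dict lookup per category instead of two.
import Mathlib
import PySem

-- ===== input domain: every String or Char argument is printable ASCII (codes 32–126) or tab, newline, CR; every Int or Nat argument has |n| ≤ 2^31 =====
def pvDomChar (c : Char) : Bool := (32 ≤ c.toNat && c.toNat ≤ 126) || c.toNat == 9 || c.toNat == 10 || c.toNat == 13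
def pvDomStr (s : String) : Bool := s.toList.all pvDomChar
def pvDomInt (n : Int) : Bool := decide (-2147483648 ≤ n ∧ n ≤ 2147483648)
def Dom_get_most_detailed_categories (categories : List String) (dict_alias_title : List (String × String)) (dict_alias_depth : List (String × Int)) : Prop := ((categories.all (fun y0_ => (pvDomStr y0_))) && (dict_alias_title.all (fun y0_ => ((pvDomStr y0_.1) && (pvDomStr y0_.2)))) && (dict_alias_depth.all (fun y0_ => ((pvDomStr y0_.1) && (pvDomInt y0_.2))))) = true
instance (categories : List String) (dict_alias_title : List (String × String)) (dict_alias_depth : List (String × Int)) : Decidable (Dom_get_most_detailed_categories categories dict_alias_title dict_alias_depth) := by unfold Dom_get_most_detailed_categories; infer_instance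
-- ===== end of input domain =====

-- B collapses A's two passes (max pass, then filter pass) into one pass that resets the
-- result list on a strictly larger depth: same return value, one dict lookup per category.

-- dict_alias_depth[dict_alias_title[category]]; the .getD defaults are never reached
-- under Pre_ (Python raises KeyError exactly where a lookup would be none).
def pvDepth (dict_alias_title : List (String × String)) (dict_alias_depth : List (String × Int)) (c : String) : Int :=
  ((PySem.Dict.mk dict_alias_depth).get? (((PySem.Dict.mk dict_alias_title).get? c).getD "")).getD 0

-- ===== PORT A =====
def get_most_detailed_categories (categories : List String) (dict_alias_title : List (String × String)) (dict_alias_depth : List (String × Int)) : List String :=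
  let max_height : Int := categories.foldl (fun m c => max (pvDepth dict_alias_title dict_alias_depth c) m) 0
  categories.foldl (fun acc c =>
    if pvDepth dict_alias_title dict_alias_depth c = max_height then acc ++ [c] else acc) []

-- ===== PORT B =====
def get_most_detailed_categories_alt (categories : List String) (dict_alias_title : List (String × String)) (dict_alias_depth : List (String × Int)) : List String :=
  (categories.foldl (fun (s : Int × List String) c =>
      let h := pvDepth dict_alias_title dict_alias_depth c
      if h > s.1 then (h, [c])
      else if h = s.1 then (s.1, s.2 ++ [c])
      else s) ((0 : Int), ([] : List String))).2

-- ===== PRECONDITION & SPEC =====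
-- Pre_ excludes exactly the inputs where Python A raises KeyError: a category missing
-- from dict_alias_title, or its title missing from dict_alias_depth.
def Pre_get_most_detailed_categories (categories : List String) (dict_alias_title : List (String × String)) (dict_alias_depth : List (String × Int)) : Prop :=
  categories.all (fun c =>
    match (PySem.Dict.mk dict_alias_title).get? c with
    | some t => ((PySem.Dict.mk dict_alias_depth).get? t).isSome
    | none => false) = true
instance (categories : List String) (dict_alias_title : List (String × String)) (dict_alias_depth : List (String × Int)) : Decidable (Pre_get_most_detailed_categories categories dict_alias_title dict_alias_depth) := by unfold Pre_get_most_detailed_categories; infer_instance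

def pvWitness_get_most_detailed_categories : List String × (List (String × String)) × (List (String × Int)) :=
  (["a", "b"], [("a", "ta"), ("b", "tb")], [("ta", 2), ("tb", 1)])

def Spec_get_most_detailed_categories (categories : List String) (dict_alias_title : List (String × String)) (dict_alias_depth : List (String × Int)) (out : List String) : Prop := out = get_most_detailed_categories_alt categories dict_alias_title dict_alias_depth
instance (categories : List String) (dict_alias_title : List (String × String)) (dict_alias_depth : List (String × Int)) (out : List String) : Decidable (Spec_get_most_detailed_categories categories dict_alias_title dict_alias_depth out) := by unfold Spec_get_most_detailed_categories; infer_instance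

-- ===== CLAIM (what is proved, stated in full; the proofs are below) =====
def Claim_equal_get_most_detailed_categories : Prop := ∀ (categories : List String) (dict_alias_title : List (String × String)) (dict_alias_depth : List (String × Int)), Dom_get_most_detailed_categories categories dict_alias_title dict_alias_depth → Pre_get_most_detailed_categories categories dict_alias_title dict_alias_depth → Spec_get_most_detailed_categories categories dict_alias_title dict_alias_depth (get_most_detailed_categories categories dict_alias_title dict_alias_depth)

-- ===== LEMMAS AND PROOFS =====

-- the running maximum never decreases along A's first loop
theorem pv_le_foldl_max (f : String → Int) (l : List String) (m : Int) :
    m ≤ l.foldl (fun m c => max (f c) m) m := by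
  induction l generalizing m with
  | nil => simp
  | cons c l ih => exact le_trans (le_max_right (f c) m) (ih (max (f c) m))

-- one-pass loop invariant: B's fold from (m, acc) yields the running maximum and,
-- as result list, acc (kept only if no reset happened) followed by the elements of
-- l whose depth equals the final maximum, in order.
theorem pv_onepass (f : String → Int) (l : List String) (m : Int) (acc : List String) :
    l.foldl (fun (s : Int × List String) c =>
        let h := f c
        if h > s.1 then (h, [c])
        else if h = s.1 then (s.1, s.2 ++ [c])
        else s) (m, acc)
    = (l.foldl (fun m c => max (f c) m) m,
       (if l.foldl (fun m c => max (f c) m) m = m then acc else [])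
         ++ l.filter (fun c => decide (f c = l.foldl (fun m c => max (f c) m) m))) := by
  induction l generalizing m acc with
  | nil => simp
  | cons c l ih =>
    simp only [List.foldl_cons, List.filter_cons]
    by_cases hgt : f c > m
    · have hmax : max (f c) m = f c := max_eq_left (le_of_lt hgt)
      simp only [hmax]
      simp only [if_pos hgt]
      rw [ih (f c) [c]]
      have hle : f c ≤ l.foldl (fun m c => max (f c) m) (f c) := pv_le_foldl_max f l (f c)
      have hne : l.foldl (fun m c => max (f c) m) (f c) ≠ m := by omega
      rw [if_neg hne]
      by_cases heq : f c = l.foldl (fun m c => max (f c) m) (f c)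
      · simp [← heq]
      · simp [heq, Ne.symm heq]
    · simp only [if_neg hgt]
      have hle : f c ≤ m := le_of_not_gt hgt
      have hmax : max (f c) m = m := max_eq_right hle
      simp only [hmax]
      have hM : m ≤ l.foldl (fun m c => max (f c) m) m := pv_le_foldl_max f l m
      by_cases heq : f c = m
      · simp only [if_pos heq]
        rw [ih m (acc ++ [c])]
        by_cases hMm : l.foldl (fun m c => max (f c) m) m = m
        · rw [if_pos hMm, if_pos hMm]
          have : f c = l.foldl (fun m c => max (f c) m) m := by omega
          simp [this]
        · rw [if_neg hMm, if_neg hMm]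
          have : f c ≠ l.foldl (fun m c => max (f c) m) m := by omega
          simp [this]
      · simp only [if_neg heq]
        rw [ih m acc]
        have : f c ≠ l.foldl (fun m c => max (f c) m) m := by omega
        simp [this]

-- ===== VERDICT (by name: the statement is the Claim_ definition above) =====
theorem get_most_detailed_categories_spec : Claim_equal_get_most_detailed_categories := by
  intro categories dict_alias_title dict_alias_depth _ _
  unfold Spec_get_most_detailed_categories
  unfold get_most_detailed_categories get_most_detailed_categories_alt
  rw [pv_onepass]
  rw [PySem.List.foldl_append_ite_eq_filter]
  simp
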